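-- pv_equiv track=rewrite | github.com/reddevilmidzy/problem-solving | 백준/Gold/9024. 두 수의 합/두 수의 합.py | twopoint
-- ===== SOURCE A (Python) =====
-- from collections import defaultdict
--
-- def twopoint(n,nums,target):
--     st = 0
--     en = n-1
--     ans = defaultdict(int)
--     while st<en:
--         tsum = nums[st]+nums[en]
--         if tsum>target:
--             en-=1
--             ans[abs(target-tsum)]+=1
--         elif tsum<target:
--             st+=1
--             ans[abs(target-tsum)]+=1
--         else:
--             ans[abs(target-tsum)]+=1
--             st+=1
--             en-=1
--
--
--     for i in sorted(ans.keys()):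
--         return ans[i]
-- ===== SOURCE B (Python) =====
-- def twopoint(n, nums, target):
--     st = 0
--     en = n - 1
--     best = None
--     cnt = 0
--     while st < en:
--         tsum = nums[st] + nums[en]
--         diff = abs(target - tsum)
--         if best is None or diff < best:
--             best, cnt = diff, 1
--         elif diff == best:
--             cnt += 1
--         if tsum > target:
--             en -= 1
--         elif tsum < target:
--             st += 1
--         else:
--             st += 1
--             en -= 1
--     return cnt if best is not None else None
-- ===== Notes on version B (the rewrite author's own statement) =====
-- stated objective: simpler
-- what changed: B keeps the same two-pointer sweep but replaces A's defaultdict histogram of all differences plus the final sorted(keys) pass by two scalars (best = minimal difference so far, cnt = its count) updated in the loop, so no dict and no O(n log n) sort are needed.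
-- outside the precondition, e.g. on twopoint(3, [1, 2], 5): A raises IndexError, B raises IndexError
import Mathlib
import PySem

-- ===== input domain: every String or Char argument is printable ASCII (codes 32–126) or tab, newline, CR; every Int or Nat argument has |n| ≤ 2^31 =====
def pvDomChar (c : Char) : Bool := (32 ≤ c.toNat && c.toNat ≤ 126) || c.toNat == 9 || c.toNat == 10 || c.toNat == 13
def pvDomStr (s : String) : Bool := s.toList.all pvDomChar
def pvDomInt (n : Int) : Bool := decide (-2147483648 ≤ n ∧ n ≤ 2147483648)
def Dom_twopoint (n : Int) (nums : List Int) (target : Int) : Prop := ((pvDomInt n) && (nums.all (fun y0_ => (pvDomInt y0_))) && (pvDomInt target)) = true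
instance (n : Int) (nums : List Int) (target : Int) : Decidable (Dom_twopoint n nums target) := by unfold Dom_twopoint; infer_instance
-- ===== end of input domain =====

-- B replaces A's defaultdict histogram of differences and the final sorted-keys pass
-- by two scalars (best difference so far, its count) maintained inside the same
-- two-pointer sweep; objective: simpler (no dict, no sort).

-- ===== PORT A =====
-- the while loop: st/en two pointers, ans the defaultdict(int) histogram of |target - tsum|
def twopointLoop (nums : List Int) (target : Int) (st en : Int) (ans : PySem.Dict Int Int) : PySem.Dict Int Int :=
  if st < en then
    let tsum := PySem.List.pyGetD nums st 0 + PySem.List.pyGetD nums en 0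
    if tsum > target then
      twopointLoop nums target st (en - 1) (ans.modify (|target - tsum|) 0 (· + 1))
    else if tsum < target then
      twopointLoop nums target (st + 1) en (ans.modify (|target - tsum|) 0 (· + 1))
    else
      twopointLoop nums target (st + 1) (en - 1) (ans.modify (|target - tsum|) 0 (· + 1))
  else ans
termination_by (en - st).toNat
decreasing_by all_goals omega

def twopoint (n : Int) (nums : List Int) (target : Int) : Option Int :=
  let ans := twopointLoop nums target 0 (n - 1) PySem.Dict.empty
  -- 'for i in sorted(ans.keys()): return ans[i]' — returns at the smallest key, or falls off (None)
  match PySem.List.sorted ans.keys (fun x => x) false with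
  | [] => none
  | i :: _ => some (ans.getD i 0)

-- ===== PORT B =====
def twopointAltLoop (nums : List Int) (target : Int) (st en : Int) (best : Option Int) (cnt : Int) :
    Option Int × Int :=
  if st < en then
    let tsum := PySem.List.pyGetD nums st 0 + PySem.List.pyGetD nums en 0
    let diff := |target - tsum|
    let p : Option Int × Int :=
      match best with
      | none => (some diff, 1)
      | some b => if diff < b then (some diff, 1) else if diff = b then (some b, cnt + 1) else (some b, cnt)
    if tsum > target then
      twopointAltLoop nums target st (en - 1) p.1 p.2
    else if tsum < target then
      twopointAltLoop nums target (st + 1) en p.1 p.2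
    else
      twopointAltLoop nums target (st + 1) (en - 1) p.1 p.2
  else (best, cnt)
termination_by (en - st).toNat
decreasing_by all_goals omega

def twopoint_alt (n : Int) (nums : List Int) (target : Int) : Option Int :=
  match twopointAltLoop nums target 0 (n - 1) none 0 with
  | (none, _) => none
  | (some _, c) => some c

-- ===== PRECONDITION & SPEC =====
-- Pre_ excludes exactly the inputs where Python A raises IndexError: n exceeding
-- len(nums) with the loop actually entered (n ≥ 2); both programs raise there.
def Pre_twopoint (n : Int) (nums : List Int) (target : Int) : Prop :=
  n ≤ (nums.length : Int) ∨ n ≤ 1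
instance (n : Int) (nums : List Int) (target : Int) : Decidable (Pre_twopoint n nums target) := by
  unfold Pre_twopoint; infer_instance
def pvWitness_twopoint : Int × List Int × Int := (4, ([2, 3, 5, 9], 10))

def Spec_twopoint (n : Int) (nums : List Int) (target : Int) (out : Option Int) : Prop := out = twopoint_alt n nums target
instance (n : Int) (nums : List Int) (target : Int) (out : Option Int) : Decidable (Spec_twopoint n nums target out) := by unfold Spec_twopoint; infer_instance

-- ===== CLAIM (what is proved, stated in full; the proofs are below) =====
def Claim_equal_twopoint : Prop := ∀ (n : Int) (nums : List Int) (target : Int), Dom_twopoint n nums target → Pre_twopoint n nums target → Spec_twopoint n nums target (twopoint n nums target)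

-- ===== LEMMAS AND PROOFS =====

-- the sequence of differences |target - tsum| inspected by the (shared) two-pointer sweep
def diffSeq (nums : List Int) (target : Int) (st en : Int) : List Int :=
  if st < en then
    let tsum := PySem.List.pyGetD nums st 0 + PySem.List.pyGetD nums en 0
    if tsum > target then |target - tsum| :: diffSeq nums target st (en - 1)
    else if tsum < target then |target - tsum| :: diffSeq nums target (st + 1) en
    else |target - tsum| :: diffSeq nums target (st + 1) (en - 1)
  else []
termination_by (en - st).toNat
decreasing_by all_goals omega

-- B's per-difference update
def stepB (p : Option Int × Int) (k : Int) : Option Int × Int :=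
  match p.1 with
  | none => (some k, 1)
  | some b => if k < b then (some k, 1) else if k = b then (some b, p.2 + 1) else (some b, p.2)

theorem twopointLoop_eq_foldl (nums : List Int) (target : Int) :
    ∀ (k : Nat) (st en : Int), (en - st).toNat ≤ k → ∀ ans,
      twopointLoop nums target st en ans =
      (diffSeq nums target st en).foldl (fun d k => d.modify k 0 (· + 1)) ans := by
  intro k
  induction k with
  | zero =>
      intro st en hk ans
      have h : ¬ st < en := by omega
      rw [twopointLoop, diffSeq, if_neg h, if_neg h]
      simp
  | succ k ih =>
      intro st en hk ans
      by_cases h : st < en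
      · conv_lhs => rw [twopointLoop]
        conv_rhs => rw [diffSeq]
        rw [if_pos h, if_pos h]
        dsimp only
        split_ifs with h1 h2 <;>
          · rw [List.foldl_cons]
            exact ih _ _ (by omega) _
      · rw [twopointLoop, diffSeq, if_neg h, if_neg h]
        simp

theorem twopointAltLoop_eq_foldl (nums : List Int) (target : Int) :
    ∀ (k : Nat) (st en : Int), (en - st).toNat ≤ k → ∀ best cnt,
      twopointAltLoop nums target st en best cnt =
      (diffSeq nums target st en).foldl stepB (best, cnt) := by
  intro k
  induction k with
  | zero =>
      intro st en hk best cnt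
      have h : ¬ st < en := by omega
      rw [twopointAltLoop, diffSeq, if_neg h, if_neg h]
      simp
  | succ k ih =>
      intro st en hk best cnt
      by_cases h : st < en
      · conv_lhs => rw [twopointAltLoop]
        conv_rhs => rw [diffSeq]
        rw [if_pos h, if_pos h]
        dsimp only
        split_ifs with h1 h2 <;>
          · rw [List.foldl_cons]
            rw [ih _ _ (by omega)]
            rfl
      · rw [twopointAltLoop, diffSeq, if_neg h, if_neg h]
        simp

-- characterisation of B's fold from a 'some' state
theorem foldl_stepB_some (l : List Int) :
    ∀ (b c : Int), l.foldl stepB (some b, c) =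
      (some (l.foldl min b),
        if l.foldl min b < b then (l.count (l.foldl min b) : Int) else c + (l.count b : Int)) := by
  induction l with
  | nil => intro b c; simp
  | cons x t ih =>
      intro b c
      have hmin : (x :: t).foldl min b = t.foldl min (min b x) := by simp
      have hle : t.foldl min (min b x) ≤ min b x := (PySem.List.foldl_min_le t (min b x)).1
      rcases lt_trichotomy x b with hx | hx | hx
      · -- x < b : reset
        have : stepB (some b, c) x = (some x, 1) := by simp [stepB, hx]
        rw [List.foldl_cons, this, ih x 1]
        have hbx : min b x = x := by omega
        rw [hmin, hbx, Prod.mk.injEq]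
        refine ⟨rfl, ?_⟩
        by_cases hm : t.foldl min x < x
        · have hxne : x ≠ t.foldl min x := by omega
          have hb : t.foldl min x < b := by omega
          simp [hm, hb, List.count_cons, hxne]
        · have hx' : t.foldl min x = x := le_antisymm ((PySem.List.foldl_min_le t x).1) (by omega)
          simp [hx', hx, List.count_cons]
          push_cast; ring
      · -- x = b : increment
        subst hx
        have : stepB (some x, c) x = (some x, c + 1) := by simp [stepB]
        rw [List.foldl_cons, this, ih x (c + 1)]
        have hbx : min x x = x := by omega
        rw [hmin, hbx]
        by_cases hm : t.foldl min x < x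
        · have hxne : x ≠ t.foldl min x := by omega
          simp [hm, List.count_cons, hxne]
        · have hx' : t.foldl min x = x := le_antisymm ((PySem.List.foldl_min_le t x).1) (by omega)
          simp [hx', List.count_cons]
          ring
      · -- x > b : ignore
        have : stepB (some b, c) x = (some b, c) := by
          simp [stepB, show ¬ x < b by omega, show x ≠ b by omega]
        rw [List.foldl_cons, this, ih b c]
        have hbx : min b x = b := by omega
        rw [hmin, hbx]
        have hxb : x ≠ b := by omega
        by_cases hm : t.foldl min b < b
        · have hxne : x ≠ t.foldl min b := by omega
          simp [hm, List.count_cons, hxne]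
        · simp [hm, List.count_cons, hxb]

-- the common answer computed from the difference list
theorem answer_eq (l : List Int) :
    (match PySem.List.sorted
        (l.foldl (fun d k => d.modify k 0 (· + 1)) (PySem.Dict.empty : PySem.Dict Int Int)).keys
        (fun x => x) false with
      | [] => (none : Option Int)
      | i :: _ => some ((l.foldl (fun d k => d.modify k 0 (· + 1)) (PySem.Dict.empty : PySem.Dict Int Int)).getD i 0)) =
    (match l.foldl stepB (none, 0) with
      | (none, _) => (none : Option Int)
      | (some _, c) => some c) := by
  have hkeys : (l.foldl (fun d k => d.modify k 0 (· + 1)) (PySem.Dict.empty : PySem.Dict Int Int)).keys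
      = PySem.Set.update (PySem.Dict.empty : PySem.Dict Int Int).keys l :=
    PySem.Dict.keys_foldl_modify l 0 (fun _ _ => (· + 1)) _
  cases l with
  | nil =>
      have hnil : PySem.List.sorted ([] : List Int) (fun x => x) false = [] :=
        (PySem.List.sorted_eq_nil_iff _ _ _).2 rfl
      simp [hnil]
  | cons x t =>
      -- B's side: after the first element the state is (some x, 1)
      have hB : (x :: t).foldl stepB (none, 0) =
          (some (t.foldl min x),
            if t.foldl min x < x then (t.count (t.foldl min x) : Int) else 1 + (t.count x : Int)) := by
        rw [List.foldl_cons, show stepB (none, 0) x = (some x, 1) from rfl, foldl_stepB_some]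
      -- A's side: the sorted key list is nonempty; its head is the minimum of x :: t
      have hmem : ∀ y : Int,
          y ∈ (PySem.Set.update (PySem.Dict.empty : PySem.Dict Int Int).keys (x :: t) : List Int) ↔ y ∈ x :: t := by
        intro y
        have : PySem.Set.update (PySem.Dict.empty : PySem.Dict Int Int).keys (x :: t)
            = PySem.Set.ofList (x :: t) := rfl
        rw [this]
        exact PySem.Set.mem_ofList _ y
      set d := (x :: t).foldl (fun d k => d.modify k 0 (· + 1)) (PySem.Dict.empty : PySem.Dict Int Int) with hd
      have hkne : (PySem.List.sorted d.keys (fun x => x) false) ≠ [] := by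
        rw [Ne, PySem.List.sorted_eq_nil_iff]
        intro hnil
        have := (hmem x).2 (by simp)
        rw [← hkeys] at this
        rw [hnil] at this
        simp at this
      rcases hs : PySem.List.sorted d.keys (fun x => x) false with _ | ⟨i, s⟩
      · exact absurd hs hkne
      · -- i is the least key, which is the minimum m of x :: t
        have himem : i ∈ (x :: t) := by
          have : i ∈ d.keys := by
            rw [← PySem.List.mem_sorted d.keys (fun x => x) false i, hs]; simp
          rw [hkeys] at this
          exact (hmem i).1 this
        have hminle : t.foldl min x ≤ x ∧ ∀ y ∈ t, t.foldl min x ≤ y := PySem.List.foldl_min_le t x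
        have hmmem : t.foldl min x ∈ (x :: t) := by
          rcases PySem.List.foldl_min_mem t x with h | h
          · rw [h]; exact List.mem_cons_self ..
          · exact List.mem_cons_of_mem _ h
        have hmi : t.foldl min x ≤ i := by
          rcases List.mem_cons.1 himem with h | h
          · rw [h]; exact hminle.1
          · exact hminle.2 i h
        have him : i ≤ t.foldl min x := by
          have hmk : t.foldl min x ∈ d.keys := by rw [hkeys]; exact (hmem _).2 hmmem
          exact PySem.List.key_head_sorted_le d.keys (fun x => x) hs _ hmk
        have hie : i = t.foldl min x := le_antisymm him hmi
        have hcount : d.getD i 0 = ((x :: t).count i : Int) := by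
          rw [hd, PySem.Dict.getD_foldl_modify_add_one]
          simp
        rw [hB]
        show some (d.getD i 0) =
          some (if t.foldl min x < x then (t.count (t.foldl min x) : Int) else 1 + (t.count x : Int))
        rw [hcount, hie]
        by_cases hlt : t.foldl min x < x
        · have hne : ¬ (x = t.foldl min x) := by omega
          simp [hlt, hne]
        · have hmx : t.foldl min x = x := le_antisymm hminle.1 (by omega)
          simp [hlt, hmx]
          ring

-- ===== VERDICT (by name: the statement is the Claim_ definition above) =====
theorem twopoint_spec : Claim_equal_twopoint := by
  intro n nums target _ _
  unfold Spec_twopoint twopoint twopoint_alt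
  rw [twopointLoop_eq_foldl nums target (n - 1 - 0).toNat 0 (n - 1) (by omega),
      twopointAltLoop_eq_foldl nums target (n - 1 - 0).toNat 0 (n - 1) (by omega)]
  exact answer_eq (diffSeq nums target 0 (n - 1))
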